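-- pv_equiv track=rewrite | github.com/mikedasquirrel/narratio | narrative_optimization/analysis/transformer_effectiveness.py | get_transformer_feature_ranges
-- ===== SOURCE A (Python) =====
-- from typing import Dict, List, Tuple
--
-- def get_transformer_feature_ranges(feature_names: List[str]) -> Dict[str, Tuple[int, int]]:
--     """
--     Identify which features belong to which transformer.
--
--     Parameters
--     ----------
--     feature_names : list of str
--         All feature names
--
--     Returns
--     -------
--     ranges : dict
--         {transformer_name: (start_idx, end_idx)}
--     """
--     ranges = {}
--     current_transformer = None
--     start_idx = 0
--
--     for i, name in enumerate(feature_names):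
--         # Try to identify transformer from feature name
--         # Feature names are typically: transformer_feature_name
--         parts = name.split('_')
--
--         # Common transformer prefixes
--         transformer_prefixes = [
--             'nominative', 'self', 'narrative', 'linguistic', 'relational',
--             'ensemble', 'conflict', 'suspense', 'framing', 'authenticity',
--             'expertise', 'temporal', 'cultural', 'phonetic', 'social',
--             'universal', 'information', 'namespace', 'anticipatory',
--             'cognitive', 'richness', 'coupling', 'mass', 'gravitational',
--             'statistical', 'pull', 'dist', 'net'
--         ]
--
--         transformer = None
--         for prefix in transformer_prefixes:
--             if prefix in name.lower():
--                 transformer = prefix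
--                 break
--
--         if transformer and transformer != current_transformer:
--             if current_transformer is not None:
--                 ranges[current_transformer] = (start_idx, i)
--             current_transformer = transformer
--             start_idx = i
--
--     # Add last transformer
--     if current_transformer is not None:
--         ranges[current_transformer] = (start_idx, len(feature_names))
--
--     return ranges
-- ===== SOURCE B (Python) =====
-- from typing import Dict, List, Tuple
--
-- # Common transformer prefixes (same table as the original)
-- _TRANSFORMER_PREFIXES = [
--     'nominative', 'self', 'narrative', 'linguistic', 'relational',
--     'ensemble', 'conflict', 'suspense', 'framing', 'authenticity',
--     'expertise', 'temporal', 'cultural', 'phonetic', 'social',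
--     'universal', 'information', 'namespace', 'anticipatory',
--     'cognitive', 'richness', 'coupling', 'mass', 'gravitational',
--     'statistical', 'pull', 'dist', 'net'
-- ]
--
--
-- def _label(name: str):
--     low = name.lower()
--     for prefix in _TRANSFORMER_PREFIXES:
--         if prefix in low:
--             return prefix
--     return None
--
--
-- def get_transformer_feature_ranges(feature_names: List[str]) -> Dict[str, Tuple[int, int]]:
--     # Pass 1: per-feature label, forward-filled (leading unmatched names stay None).
--     filled = []
--     last = None
--     for name in feature_names:
--         lab = _label(name)
--         if lab is not None:
--             last = lab
--         filled.append(last)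
--
--     # Pass 2: run-length encode the forward-filled labels.
--     runs = []
--     for lab in filled:
--         if runs and runs[-1][0] == lab:
--             runs[-1] = (lab, runs[-1][1] + 1)
--         else:
--             runs.append((lab, 1))
--
--     # Pass 3: turn runs into index ranges; later runs of a label overwrite earlier ones.
--     ranges = {}
--     idx = 0
--     for lab, k in runs:
--         if lab is not None:
--             ranges[lab] = (idx, idx + k)
--         idx += k
--     return ranges
-- ===== Notes on version B (the rewrite author's own statement) =====
-- stated objective: alternative
-- what changed: Replaces A's single stateful boundary-detecting loop (current transformer + start index mutated in flight) by a three-pass pipeline: label each name and forward-fill, run-length encode the filled labels, then map runs to index ranges.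
import Mathlib
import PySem

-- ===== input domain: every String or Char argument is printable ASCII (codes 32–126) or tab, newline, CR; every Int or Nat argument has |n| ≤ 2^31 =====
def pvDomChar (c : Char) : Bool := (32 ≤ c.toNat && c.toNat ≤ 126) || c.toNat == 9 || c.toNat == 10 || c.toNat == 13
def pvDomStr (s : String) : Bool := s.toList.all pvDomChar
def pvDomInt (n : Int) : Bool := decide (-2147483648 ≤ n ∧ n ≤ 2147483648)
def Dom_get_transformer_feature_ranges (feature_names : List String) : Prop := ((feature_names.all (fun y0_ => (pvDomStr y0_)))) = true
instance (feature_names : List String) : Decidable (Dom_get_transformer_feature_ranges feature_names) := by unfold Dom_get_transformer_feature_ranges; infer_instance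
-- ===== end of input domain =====

-- B replaces A's single stateful boundary-detecting loop by a three-pass pipeline
-- (label+forward-fill, run-length encode, runs → ranges); same asymptotic cost, with a
-- constant-factor gain (no per-iteration prefix-table rebuild, no unused name.split('_')).

-- ===== PORT A =====
-- the literal prefix table of both Pythons
def pvPrefixes : List String :=
  ["nominative", "self", "narrative", "linguistic", "relational",
   "ensemble", "conflict", "suspense", "framing", "authenticity",
   "expertise", "temporal", "cultural", "phonetic", "social",
   "universal", "information", "namespace", "anticipatory",
   "cognitive", "richness", "coupling", "mass", "gravitational",
   "statistical", "pull", "dist", "net"]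

-- the inner 'for prefix in transformer_prefixes: if prefix in name.lower(): … break' loop
-- (identical code in A and in Source B's _label)
def pvFirstPrefix (name : String) : Option String :=
  pvPrefixes.find? (fun p => PySem.Str.isIn p (PySem.Str.lower name))

-- A's for-loop over enumerate(feature_names), state (ranges, current_transformer, start_idx)
def pvALoop : List (Int × String) → PySem.Dict String (Int × Int) × Option String × Int →
    PySem.Dict String (Int × Int) × Option String × Int
  | [], st => st
  | (i, name) :: rest, (ranges, cur, start) =>
      let _parts := PySem.Str.split? name "_"   -- A computes parts but never uses it
      let transformer := pvFirstPrefix name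
      if transformer.isSome ∧ transformer ≠ cur then
        pvALoop rest
          ((match cur with
            | some c => ranges.insert c (start, i)
            | none => ranges), transformer, i)
      else
        pvALoop rest (ranges, cur, start)

def get_transformer_feature_ranges (feature_names : List String) : List (String × Int × Int) :=
  let st := pvALoop (PySem.List.enumerate feature_names) (PySem.Dict.empty, none, 0)
  let ranges :=
    match st.2.1 with
    | some c => st.1.insert c (st.2.2, (feature_names.length : Int))
    | none => st.1
  ranges.items

-- ===== PORT B =====
-- pass 1: per-name label, forward-filled ('last' carried through the loop)
def pvFfill (last : Option String) : List String → List (Option String)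
  | [] => []
  | name :: rest =>
      let lab := pvFirstPrefix name
      let last' := match lab with | some l => some l | none => last
      last' :: pvFfill last' rest

-- pass 2 body: 'if runs and runs[-1][0] == lab: bump last count else append (lab, 1)'
def pvBump (runs : List (Option String × Nat)) (lab : Option String) : List (Option String × Nat) :=
  match runs.getLast? with
  | some (y, k) => if y = lab then runs.dropLast ++ [(lab, k + 1)] else runs ++ [(lab, 1)]
  | none => [(lab, 1)]

def get_transformer_feature_ranges_alt (feature_names : List String) : List (String × Int × Int) :=
  let filled := pvFfill none feature_names
  let runs := filled.foldl pvBump []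
  let st := runs.foldl
    (fun (st : PySem.Dict String (Int × Int) × Int) r =>
      match r with
      | (some lab, k) => (st.1.insert lab (st.2, st.2 + (k : Int)), st.2 + (k : Int))
      | (none, k) => (st.1, st.2 + (k : Int)))
    (PySem.Dict.empty, 0)
  st.1.items

-- ===== PRECONDITION & SPEC =====
def Spec_get_transformer_feature_ranges (feature_names : List String) (out : List (String × Int × Int)) : Prop := out = get_transformer_feature_ranges_alt feature_names
instance (feature_names : List String) (out : List (String × Int × Int)) : Decidable (Spec_get_transformer_feature_ranges feature_names out) := by unfold Spec_get_transformer_feature_ranges; infer_instance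

-- ===== CLAIM (what is proved, stated in full; the proofs are below) =====
def Claim_equal_get_transformer_feature_ranges : Prop := ∀ (feature_names : List String), Dom_get_transformer_feature_ranges feature_names → Spec_get_transformer_feature_ranges feature_names (get_transformer_feature_ranges feature_names)

-- ===== LEMMAS AND PROOFS =====

-- right-recursive run-length encoding (proof-side normal form of pass 2)
def pvConsRun (x : Option String) (k : Nat) (rs : List (Option String × Nat)) : List (Option String × Nat) :=
  match rs with
  | (y, j) :: t => if y = x then (x, k + j) :: t else (x, k) :: rs
  | [] => [(x, k)]

def pvRle : List (Option String) → List (Option String × Nat)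
  | [] => []
  | x :: t => pvConsRun x 1 (pvRle t)

-- proof-side normal form of pass 3
def pvBB (d : PySem.Dict String (Int × Int)) (i : Int) : List (Option String × Nat) → PySem.Dict String (Int × Int)
  | [] => d
  | (none, k) :: rs => pvBB d (i + (k : Int)) rs
  | (some c, k) :: rs => pvBB (d.insert c (i, i + (k : Int))) (i + (k : Int)) rs

-- A's trailing 'if current_transformer is not None: ranges[current] = (start, len)'
def pvFinish (st : PySem.Dict String (Int × Int) × Option String × Int) (lim : Int) : PySem.Dict String (Int × Int) :=
  match st.2.1 with
  | some c => st.1.insert c (st.2.2, lim)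
  | none => st.1

theorem pvConsRun_consRun (x : Option String) (n m : Nat) (rs : List (Option String × Nat)) :
    pvConsRun x n (pvConsRun x m rs) = pvConsRun x (n + m) rs := by
  cases rs with
  | nil => simp [pvConsRun]
  | cons h t =>
    obtain ⟨y, j⟩ := h
    by_cases hy : y = x <;> simp [pvConsRun, hy, Nat.add_assoc]

theorem pvConsRun_ne (x y : Option String) (hne : x ≠ y) (n k : Nat) (rs : List (Option String × Nat)) :
    pvConsRun y n (pvConsRun x k rs) = (y, n) :: pvConsRun x k rs := by
  cases rs with
  | nil => simp [pvConsRun, hne]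
  | cons h t =>
    obtain ⟨z, j⟩ := h
    by_cases hz : z = x <;> simp [pvConsRun, hz, hne]

theorem pvFoldlBump_concat (xs : List (Option String)) :
    ∀ (acc : List (Option String × Nat)) (a : Option String) (k : Nat),
    List.foldl pvBump (acc ++ [(a, k)]) xs = acc ++ pvConsRun a k (pvRle xs) := by
  induction xs with
  | nil => intro acc a k; simp [pvConsRun, pvRle]
  | cons x t ih =>
    intro acc a k
    by_cases hx : a = x
    · subst hx
      have hb : pvBump (acc ++ [(a, k)]) a = acc ++ [(a, k + 1)] := by
        simp [pvBump]
      rw [List.foldl_cons, hb, ih acc a (k + 1)]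
      simp only [pvRle]
      rw [pvConsRun_consRun]
    · have hb : pvBump (acc ++ [(a, k)]) x = (acc ++ [(a, k)]) ++ [(x, 1)] := by
        simp [pvBump, hx]
      rw [List.foldl_cons, hb, ih (acc ++ [(a, k)]) x 1]
      simp only [pvRle, List.append_assoc]
      rw [pvConsRun_ne x a (fun h => hx h.symm) k 1 (pvRle t)]
      simp

theorem pvFoldlBump_nil (xs : List (Option String)) :
    List.foldl pvBump [] xs = pvRle xs := by
  cases xs with
  | nil => rfl
  | cons x t =>
    have : pvBump [] x = [] ++ [(x, 1)] := by simp [pvBump]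
    simp only [List.foldl_cons, this]
    rw [pvFoldlBump_concat t [] x 1]
    simp [pvRle]

theorem pvBB_foldl (rs : List (Option String × Nat)) :
    ∀ (d : PySem.Dict String (Int × Int)) (i : Int),
    (List.foldl
      (fun (st : PySem.Dict String (Int × Int) × Int) r =>
        match r with
        | (some lab, k) => (st.1.insert lab (st.2, st.2 + (k : Int)), st.2 + (k : Int))
        | (none, k) => (st.1, st.2 + (k : Int)))
      (d, i) rs).1 = pvBB d i rs := by
  induction rs with
  | nil => intro d i; rfl
  | cons r t ih =>
    intro d i
    obtain ⟨l, k⟩ := r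
    cases l <;> simp only [List.foldl_cons, pvBB] <;> exact ih _ _

-- the main invariant: A's loop from state (d, c, s) at index s+n equals
-- B's run processing with a pending run (c, n) started at s
theorem pvMain (names : List String) :
    ∀ (d : PySem.Dict String (Int × Int)) (c : Option String) (s : Int) (n : Nat),
    pvFinish (pvALoop (PySem.List.enumerate names (s + (n : Int))) (d, c, s)) (s + (n : Int) + (names.length : Int))
      = pvBB d s (pvConsRun c n (pvRle (pvFfill c names))) := by
  induction names with
  | nil =>
    intro d c s n
    cases c with
    | none => simp [PySem.List.enumerate_nil, pvALoop, pvFinish, pvFfill, pvRle, pvConsRun, pvBB]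
    | some c₀ => simp [PySem.List.enumerate_nil, pvALoop, pvFinish, pvFfill, pvRle, pvConsRun, pvBB]
  | cons name rest ih =>
    intro d c s n
    rw [PySem.List.enumerate_cons]
    cases hl : pvFirstPrefix name with
    | none =>
      -- no label: A keeps its state; B's filled list extends the current run
      have hA : pvALoop ((s + (n : Int), name) :: PySem.List.enumerate rest (s + (n : Int) + 1)) (d, c, s)
          = pvALoop (PySem.List.enumerate rest (s + (n : Int) + 1)) (d, c, s) := by
        simp [pvALoop, hl]
      rw [hA]
      have h1 : s + (n : Int) + 1 = s + ((n + 1 : Nat) : Int) := by push_cast; ring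
      have h2 : s + (n : Int) + ((rest.length + 1 : Nat) : Int) = s + ((n + 1 : Nat) : Int) + (rest.length : Int) := by
        push_cast; ring
      simp only [List.length_cons]
      rw [h2, h1, ih d c s (n + 1)]
      simp only [pvFfill, hl, pvRle]
      rw [pvConsRun_consRun]
    | some p =>
      by_cases hc : some p = c
      · -- same label as the current transformer: A keeps its state; run extends
        have hA : pvALoop ((s + (n : Int), name) :: PySem.List.enumerate rest (s + (n : Int) + 1)) (d, c, s)
            = pvALoop (PySem.List.enumerate rest (s + (n : Int) + 1)) (d, c, s) := by
          simp [pvALoop, hl, hc]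
        rw [hA]
        have h1 : s + (n : Int) + 1 = s + ((n + 1 : Nat) : Int) := by push_cast; ring
        have h2 : s + (n : Int) + ((rest.length + 1 : Nat) : Int) = s + ((n + 1 : Nat) : Int) + (rest.length : Int) := by
          push_cast; ring
        simp only [List.length_cons]
        rw [h2, h1, ih d c s (n + 1)]
        simp only [pvFfill, hl]
        rw [← hc]
        simp only [pvRle]
        rw [pvConsRun_consRun]
      · -- new transformer: A closes the pending range; B emits the pending run (c, n)
        have h1 : s + (n : Int) + 1 = (s + (n : Int)) + ((1 : Nat) : Int) := by push_cast; ring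
        have h2 : s + (n : Int) + ((rest.length + 1 : Nat) : Int)
            = (s + (n : Int)) + ((1 : Nat) : Int) + (rest.length : Int) := by push_cast; ring
        cases c with
        | none =>
          have hA : pvALoop ((s + (n : Int), name) :: PySem.List.enumerate rest (s + (n : Int) + 1)) (d, none, s)
              = pvALoop (PySem.List.enumerate rest (s + (n : Int) + 1)) (d, some p, s + (n : Int)) := by
            simp [pvALoop, hl, hc]
          rw [hA]
          simp only [List.length_cons]
          rw [h2, h1, ih d (some p) (s + (n : Int)) 1]
          simp only [pvFfill, hl, pvRle]
          rw [pvConsRun_ne (some p) none hc n 1 (pvRle (pvFfill (some p) rest))]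
          simp [pvBB]
        | some c₀ =>
          have hA : pvALoop ((s + (n : Int), name) :: PySem.List.enumerate rest (s + (n : Int) + 1)) (d, some c₀, s)
              = pvALoop (PySem.List.enumerate rest (s + (n : Int) + 1))
                  (d.insert c₀ (s, s + (n : Int)), some p, s + (n : Int)) := by
            simp [pvALoop, hl, hc]
          rw [hA]
          simp only [List.length_cons]
          rw [h2, h1, ih (d.insert c₀ (s, s + (n : Int))) (some p) (s + (n : Int)) 1]
          simp only [pvFfill, hl, pvRle]
          rw [pvConsRun_ne (some p) (some c₀) hc n 1 (pvRle (pvFfill (some p) rest))]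
          simp [pvBB]

theorem pvBB_consRun_none (d : PySem.Dict String (Int × Int)) (i : Int) (rs : List (Option String × Nat)) :
    pvBB d i (pvConsRun none 0 rs) = pvBB d i rs := by
  cases rs with
  | nil => simp [pvConsRun, pvBB]
  | cons h t =>
    obtain ⟨y, k⟩ := h
    cases y with
    | none => simp [pvConsRun, pvBB]
    | some c₀ => simp [pvConsRun, pvBB]

-- ===== VERDICT (by name: the statement is the Claim_ definition above) =====
theorem get_transformer_feature_ranges_spec : Claim_equal_get_transformer_feature_ranges := by
  intro feature_names _
  unfold Spec_get_transformer_feature_ranges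
  unfold get_transformer_feature_ranges get_transformer_feature_ranges_alt
  simp only [pvFoldlBump_nil, pvBB_foldl]
  have h0 : PySem.List.enumerate feature_names = PySem.List.enumerate feature_names ((0 : Int) + ((0 : Nat) : Int)) := by
    norm_num
  have hmain := pvMain feature_names PySem.Dict.empty none 0 0
  rw [pvBB_consRun_none] at hmain
  have hfin : pvFinish (pvALoop (PySem.List.enumerate feature_names ((0 : Int) + ((0 : Nat) : Int))) (PySem.Dict.empty, none, 0))
      ((0 : Int) + ((0 : Nat) : Int) + (feature_names.length : Int))
      = pvBB PySem.Dict.empty 0 (pvRle (pvFfill none feature_names)) := hmain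
  rw [← h0] at hfin
  norm_num at hfin
  rw [← hfin]
  rfl
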